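-- pv_equiv track=rewrite | github.com/jwg4/oeis_misc | python/utils/output.py | data_section
-- ===== SOURCE A (Python) =====
-- def data_section(values):
--     """
--         >>> data_section(range(0, 260))
--         '0, 1, 2, 3, 4, 5, 6, 7, 8, 9, 10, 11, 12, 13, 14, 15, 16, 17, 18, 19, 20, 21, 22, 23, 24, 25, 26, 27, 28, 29, 30, 31, 32, 33, 34, 35, 36, 37, 38, 39, 40, 41, 42, 43, 44, 45, 46, 47, 48, 49, 50, 51, 52, 53, 54, 55, 56, 57, 58, 59, 60, 61, 62, 63, 64, 65, 66, 67'
--         >>> data_section(range(0, 10))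
--         '0, 1, 2, 3, 4, 5, 6, 7, 8, 9'
--         >>> data_section([2] * 200)
--         '2, 2, 2, 2, 2, 2, 2, 2, 2, 2, 2, 2, 2, 2, 2, 2, 2, 2, 2, 2, 2, 2, 2, 2, 2, 2, 2, 2, 2, 2, 2, 2, 2, 2, 2, 2, 2, 2, 2, 2, 2, 2, 2, 2, 2, 2, 2, 2, 2, 2, 2, 2, 2, 2, 2, 2, 2, 2, 2, 2, 2, 2, 2, 2, 2, 2, 2, 2, 2, 2, 2, 2, 2, 2, 2, 2, 2, 2, 2, 2, 2, 2, 2, 2, 2, 2, 2'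
--     """
--     ss = [str(v) for v in values]
--     l = len(ss[0])
--     i = 1
--     for s in ss[1:]:
--         l = l + len(ss[i]) + 2
--         if l > 260:
--             break
--         i = i + 1
--     return ", ".join(ss[:i])
-- ===== SOURCE B (Python) =====
-- def data_section(values):
--     ss = [str(v) for v in values]
--     cum = []
--     total = 0
--     for s in ss:
--         total += len(s) + 2
--         cum.append(total)
--     # cum[j] is 2 + the joined length of ss[:j+1]; cum is strictly increasing,
--     # so the break point is just a count of entries <= 262.
--     k = sum(1 for t in cum if t <= 262)
--     k = max(k, 1)
--     return ", ".join(ss[:k])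
-- ===== Notes on version B (the rewrite author's own statement) =====
-- stated objective: alternative
-- what changed: B replaces A's break-on-overflow loop with synchronized index bookkeeping by a prefix-sum pass: it builds the list of cumulative join lengths, takes the cut point as a count of cumulative values <= 262 (clamped to 1 so the first element is always kept), and joins that prefix.
-- crash fix: On the empty list A raises IndexError (it reads ss[0]); B returns the empty string. — e.g. on data_section([]): A raises IndexError, B returns ""
import Mathlib
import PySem

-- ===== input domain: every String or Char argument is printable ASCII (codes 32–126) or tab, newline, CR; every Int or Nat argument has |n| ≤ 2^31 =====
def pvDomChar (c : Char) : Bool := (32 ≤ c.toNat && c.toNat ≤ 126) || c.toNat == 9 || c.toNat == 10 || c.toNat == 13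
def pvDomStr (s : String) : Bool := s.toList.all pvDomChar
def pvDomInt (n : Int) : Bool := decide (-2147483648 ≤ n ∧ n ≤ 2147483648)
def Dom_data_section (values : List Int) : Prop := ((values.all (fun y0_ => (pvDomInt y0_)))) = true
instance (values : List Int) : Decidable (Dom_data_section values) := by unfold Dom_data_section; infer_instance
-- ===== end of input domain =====

-- B replaces A's break-on-overflow loop with a prefix-sum pass plus a count of
-- cumulative lengths ≤ 262 (alternative decomposition, same O(n) cost).


-- ===== PORT A =====
-- A's for-loop over ss[1:] with the break and the running index i
def dsLoopA : List String → Int → Int → Int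
  | [], _, i => i
  | s :: rest, l, i =>
    let l' := l + PySem.Str.len s + 2
    if l' > 260 then i else dsLoopA rest l' (i + 1)

def data_section (values : List Int) : String :=
  let ss := values.map PySem.Int.toStr
  match ss with
  | [] => ""   -- Python raises IndexError at ss[0]; outside Pre_data_section
  | s0 :: rest =>
    let i := dsLoopA rest (PySem.Str.len s0) 1
    PySem.Str.join ", " (PySem.List.slice ss none (some i))

-- ===== PORT B =====
def data_section_alt (values : List Int) : String :=
  let ss := values.map PySem.Int.toStr
  let cum := (ss.foldl (fun (p : List Int × Int) s =>
      let t := p.2 + PySem.Str.len s + 2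
      (p.1 ++ [t], t)) ([], 0)).1
  let k : Int := ((cum.countP (fun t => decide (t ≤ 262)) : Nat) : Int)
  let k := max k 1
  PySem.Str.join ", " (PySem.List.slice ss none (some k))

-- ===== PRECONDITION & SPEC =====
-- Pre_ excludes only the empty list, on which A raises IndexError at ss[0].
def Pre_data_section (values : List Int) : Prop := values ≠ []
instance (values : List Int) : Decidable (Pre_data_section values) := by unfold Pre_data_section; infer_instance
def pvWitness_data_section : List Int := ([1, 2, 3])

-- On the empty list A raises IndexError (it reads ss[0]); B returns the empty string.
def Raises_data_section (values : List Int) : Prop := values = []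
instance (values : List Int) : Decidable (Raises_data_section values) := by unfold Raises_data_section; infer_instance
def pvRaiseWitness_data_section : List Int := ([])
def pvRaiseWitnessOut_data_section : String := ""

def Spec_data_section (values : List Int) (out : String) : Prop := out = data_section_alt values
instance (values : List Int) (out : String) : Decidable (Spec_data_section values out) := by unfold Spec_data_section; infer_instance

-- ===== CLAIM (what is proved, stated in full; the proofs are below) =====
def Claim_equal_data_section : Prop := ∀ (values : List Int), Dom_data_section values → Pre_data_section values → Spec_data_section values (data_section values)
def Claim_raises_data_section : Prop := (∀ (values : List Int), Dom_data_section values → Raises_data_section values → ¬ Pre_data_section values) ∧ (Dom_data_section (pvRaiseWitness_data_section) ∧ Raises_data_section (pvRaiseWitness_data_section) ∧ data_section_alt (pvRaiseWitness_data_section) = pvRaiseWitnessOut_data_section)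

-- ===== LEMMAS AND PROOFS =====

-- the cumulative-length list B's first loop builds, as a recursion
def dsCum : List String → Int → List Int
  | [], _ => []
  | s :: r, t => (t + PySem.Str.len s + 2) :: dsCum r (t + PySem.Str.len s + 2)

-- how many leading cumulative values stay ≤ 262
def dsCnt : List String → Int → Nat
  | [], _ => 0
  | s :: r, t =>
    if t + PySem.Str.len s + 2 > 262 then 0 else 1 + dsCnt r (t + PySem.Str.len s + 2)

theorem dsCum_foldl (ss : List String) (acc : List Int) (t : Int) :
    (ss.foldl (fun (p : List Int × Int) s =>
      let t := p.2 + PySem.Str.len s + 2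
      (p.1 ++ [t], t)) (acc, t)).1 = acc ++ dsCum ss t := by
  induction ss generalizing acc t with
  | nil => simp [dsCum]
  | cons s r ih =>
    simp only [List.foldl_cons, dsCum]
    rw [ih, List.append_assoc]
    rfl

theorem dsCnt_zero (r : List String) (t : Int) (h : 260 < t) : dsCnt r t = 0 := by
  cases r with
  | nil => rfl
  | cons s r =>
    rw [dsCnt, if_pos (by simp only [PySem.Str.len_eq]; omega)]

theorem dsCum_countP (r : List String) (t : Int) :
    (dsCum r t).countP (fun t => decide (t ≤ 262)) = dsCnt r t := by
  induction r generalizing t with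
  | nil => simp [dsCum, dsCnt]
  | cons s r ih =>
    simp only [dsCum, dsCnt, List.countP_cons, ih, PySem.Str.len_eq]
    by_cases h : t + (s.toList.length : Int) + 2 ≤ 262
    · rw [if_pos (by simpa using h), if_neg (by omega)]
      omega
    · rw [if_neg (by simpa using h), if_pos (by omega),
        dsCnt_zero r _ (by omega)]

theorem dsLoopA_eq (r : List String) (l i : Int) :
    dsLoopA r l i = i + (dsCnt r (l + 2) : Int) := by
  induction r generalizing l i with
  | nil => simp [dsLoopA, dsCnt]
  | cons s r ih =>
    simp only [dsLoopA, dsCnt]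
    split_ifs with h h' h'
    · omega
    · omega
    · omega
    · rw [ih]; push_cast; ring_nf

-- ===== VERDICT (by name: the statement is the Claim_ definition above) =====
theorem data_section_spec : Claim_equal_data_section := by
  intro values _ hpre
  unfold Spec_data_section data_section data_section_alt
  cases values with
  | nil => exact absurd rfl hpre
  | cons v vs =>
    simp only [List.map_cons]
    rw [dsCum_foldl, List.nil_append, dsCum_countP, dsLoopA_eq]
    have hlen : (0 : Int) ≤ PySem.Str.len (PySem.Int.toStr v) := by
      rw [PySem.Str.len_eq]; positivity
    simp only [dsCnt]
    split_ifs with h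
    · -- first string alone already exceeds: count is 0, clamp gives 1, and the
      -- rest of A's loop also contributes 0 since the budget is already blown
      have hz : dsCnt (vs.map PySem.Int.toStr) (PySem.Str.len (PySem.Int.toStr v) + 2) = 0 := by
        cases vs with
        | nil => simp [dsCnt]
        | cons w ws =>
          simp only [List.map_cons, dsCnt]
          have : (0 : Int) ≤ PySem.Str.len (PySem.Int.toStr w) := by
            rw [PySem.Str.len_eq]; positivity
          rw [if_pos (by omega)]
      rw [hz]; norm_num
    · rw [max_eq_left (by push_cast; omega)]
      push_cast
      rw [zero_add]

@[simp] theorem data_section_raises : Claim_raises_data_section := by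
  unfold Claim_raises_data_section
  exact ⟨fun values _ h => by simp [Raises_data_section] at h; simp [Pre_data_section, h], by decide⟩
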